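-- pv_equiv track=rewrite | github.com/Minsik113/Coding-Test-Study | 최선도/05-이진 탐색/30.py | solution
-- ===== SOURCE A (Python) =====
-- from pprint import pprint
--
-- def solution(words, queries):
--     answer = []
--     rev_words, counted = [], []   # 조건 b, c를 위한 두 변수
--     for w in words:
--         rev_words.append(w[::-1])
--         counted.append(len(w))
--
--     trie = make_trie({}, words)   # 조건 a 의 trie
--     rev_trie = make_trie({}, rev_words)   # 조건 b 의 rev_trie
--
--     for query in queries:  # 3가지 조건으로 나누어서,
--         if query[0] == '?' and query[-1] == '?': # 양 끝이 모두 ? 일 때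
--             answer.append(counted.count(len(query))) # 쿼리의 길이가 같은 단어를 한번에 추가
--         elif query[0] == '?': # 시작이 ?로 시작하면
--             answer.append(search_trie(rev_trie, query[::-1], len(query)))
--         elif query[-1] == '?': # 끝이 ?로 시작하면
--             answer.append(search_trie(trie, query, len(query)))
--
--     return answer
--
-- def make_trie(trie, words):
--     for word in words:
--         node = trie
--         length = len(word)
--         for w in word:
--             if w in node:
--                 node = node[w]
--                 node['!'].append(length)
--             else:
--                 node[w] = {}
--                 node = node[w]
--                 node['!'] = [length]
--     pprint(trie)
--     return trie
--
-- def search_trie(trie, query, length):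
--     count = 0
--     if query[0] == '?':
--         return trie['!'].count(length)
--     elif query[0] in trie:
--         count += search_trie(trie[query[0]], query[1:], length)
--     return count
-- ===== SOURCE B (Python) =====
-- # B: replaces A's per-query trie walks (whose terminal list.count scans the whole length
-- # list of the node) by hash indexes built once: counts of (prefix, length) pairs for the
-- # words and for the reversed words, plus a length counter; each query is one dict lookup.
--
-- def solution(words, queries):
--     by_len = {}
--     for w in words:
--         by_len[len(w)] = by_len.get(len(w), 0) + 1
--     pre = _index(words)
--     suf = _index([w[::-1] for w in words])
--     ans = []
--     for q in queries:
--         if q[0] == '?' and q[-1] == '?':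
--             ans.append(by_len.get(len(q), 0))
--         elif q[0] == '?':
--             ans.append(suf.get((_stem(q[::-1]), len(q)), 0))
--         elif q[-1] == '?':
--             ans.append(pre.get((_stem(q), len(q)), 0))
--     return ans
--
-- def _index(ws):
--     d = {}
--     for w in ws:
--         for i in range(1, len(w) + 1):
--             k = (w[:i], len(w))
--             d[k] = d.get(k, 0) + 1
--     return d
--
-- def _stem(q):
--     # characters before the first '?'
--     p = ""
--     for ch in q:
--         if ch == '?':
--             break
--         p += ch
--     return p
-- ===== Notes on version B (the rewrite author's own statement) =====
-- stated objective: alternative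
-- what changed: Replaces A's two tries (each query answered by a trie walk whose terminal node's whole length list is scanned with list.count) by flat hash counters built in one pass over the words: a length counter plus dicts counting (prefix,length) pairs of the words and of the reversed words, so each query becomes a single dict lookup keyed by its stem and length.
import Mathlib
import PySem

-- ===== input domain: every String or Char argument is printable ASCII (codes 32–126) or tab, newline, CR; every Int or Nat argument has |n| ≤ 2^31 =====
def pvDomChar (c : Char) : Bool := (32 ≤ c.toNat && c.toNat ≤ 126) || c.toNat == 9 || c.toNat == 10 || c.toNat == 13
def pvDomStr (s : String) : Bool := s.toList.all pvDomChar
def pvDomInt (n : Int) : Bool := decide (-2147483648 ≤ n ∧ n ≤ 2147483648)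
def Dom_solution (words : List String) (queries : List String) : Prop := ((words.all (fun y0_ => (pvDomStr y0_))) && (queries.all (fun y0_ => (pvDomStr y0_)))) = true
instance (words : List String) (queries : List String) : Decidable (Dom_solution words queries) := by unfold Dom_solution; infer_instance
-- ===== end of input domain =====

-- B replaces A's tries by (prefix,length) hash counters built once; equivalence of the two
-- RETURN values is proved on Pre_ (A also prints the tries via pprint; B does not print).

-- ===== PORT A =====
-- Python's trie is a dict whose '!' key holds a list of lengths and whose other keys are
-- child dicts; modelled as a mutual inductive (bang list + association list of children).
-- Inside Pre_ no word/query makes Python read or write '!' as both sentinel and character.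
mutual
inductive PvTrie where
  | mk : List Int → PvKids → PvTrie
inductive PvKids where
  | nil : PvKids
  | cons : Char → PvTrie → PvKids → PvKids
end

def PvTrie.bang : PvTrie → List Int
  | .mk b _ => b

def PvTrie.kids : PvTrie → PvKids
  | .mk _ k => k

-- `c in node` / `node[c]` on the child keys
def PvKids.find? : PvKids → Char → Option PvTrie
  | .nil, _ => none
  | .cons c0 t0 k, c => if c0 = c then some t0 else k.find? c

-- `node[c] = v` : overwrite in place, new keys appended (dict insertion order)
def PvKids.set : PvKids → Char → PvTrie → PvKids
  | .nil, c, t => .cons c t .nil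
  | .cons c0 t0 k, c, t => if c0 = c then .cons c0 t k else .cons c0 t0 (k.set c t)

-- inner `for w in word` loop of make_trie, for one word (length already computed)
def pvInsert (t : PvTrie) (L : Int) : List Char → PvTrie
  | [] => t
  | c :: cs =>
    match t.kids.find? c with
    | some t' => .mk t.bang (t.kids.set c (pvInsert (.mk (t'.bang ++ [L]) t'.kids) L cs))
    | none => .mk t.bang (t.kids.set c (pvInsert (.mk [L] .nil) L cs))

-- make_trie({}, words)  (the pprint side effect returns no value and is dropped)
def pvMakeTrie (t0 : PvTrie) (ws : List String) : PvTrie :=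
  ws.foldl (fun t w => pvInsert t (PySem.Str.len w) w.toList) t0

-- search_trie(trie, query, length); [] is Python's IndexError case (unreachable inside Pre_)
def pvSearch : PvTrie → List Char → Int → Int
  | _, [], _ => 0
  | t, c :: cs, L =>
    if c = '?' then (PySem.List.count t.bang L : Int)
    else
      match t.kids.find? c with
      | some t' => pvSearch t' cs L
      | none => 0

def solution (words : List String) (queries : List String) : List Int :=
  let revWords := words.map (fun w => (PySem.Str.slice? w none none (-1)).getD "")  -- w[::-1]
  let counted := words.map (fun w => PySem.Str.len w)
  let trie := pvMakeTrie (.mk [] .nil) words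
  let revTrie := pvMakeTrie (.mk [] .nil) revWords
  queries.foldl (fun answer q =>
    match PySem.Str.pyGet? q 0, PySem.Str.pyGet? q (-1) with   -- query[0], query[-1]
    | some c0, some cl =>
      if c0 = '?' ∧ cl = '?' then
        answer ++ [(PySem.List.count counted (PySem.Str.len q) : Int)]
      else if c0 = '?' then
        answer ++ [pvSearch revTrie (((PySem.Str.slice? q none none (-1)).getD "").toList) (PySem.Str.len q)]
      else if cl = '?' then
        answer ++ [pvSearch trie q.toList (PySem.Str.len q)]
      else answer
    | _, _ => answer) []   -- none: Python raises IndexError (empty query, outside Pre_)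

-- ===== PORT B =====
-- _stem(q): characters before the first '?'
def pvStemGo : List Char → List Char
  | [] => []
  | c :: cs => if c = '?' then [] else c :: pvStemGo cs

def pvStem (q : String) : String := String.ofList (pvStemGo q.toList)

-- _index(ws): dict counting (w[:i], len(w)) for i in range(1, len(w)+1)
def pvIndexStep (d : PySem.Dict (String × Int) Int) (w : String) : PySem.Dict (String × Int) Int :=
  (PySem.List.pyRange 1 (PySem.Str.len w + 1) 1).foldl
    (fun d i =>
      let k := (PySem.Str.slice w none (some i), PySem.Str.len w)
      d.insert k (d.getD k 0 + 1)) d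

def pvIndex (ws : List String) : PySem.Dict (String × Int) Int :=
  ws.foldl pvIndexStep PySem.Dict.empty

def solution_alt (words : List String) (queries : List String) : List Int :=
  let byLen := words.foldl (fun d w => d.insert (PySem.Str.len w) (d.getD (PySem.Str.len w) 0 + 1))
    PySem.Dict.empty
  let pre := pvIndex words
  let suf := pvIndex (words.map (fun w => (PySem.Str.slice? w none none (-1)).getD ""))
  queries.foldl (fun ans q =>
    match PySem.Str.pyGet? q 0 with       -- q[0] (empty query: IndexError, outside Pre_)
    | none => ans
    | some c0 =>
      match PySem.Str.pyGet? q (-1) with  -- q[-1]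
      | none => ans
      | some cl =>
        if c0 = '?' ∧ cl = '?' then
          ans ++ [byLen.getD (PySem.Str.len q) 0]
        else if c0 = '?' then
          ans ++ [suf.getD (pvStem ((PySem.Str.slice? q none none (-1)).getD ""), PySem.Str.len q) 0]
        else if cl = '?' then
          ans ++ [pre.getD (pvStem q, PySem.Str.len q) 0]
        else ans) []

-- ===== PRECONDITION & SPEC =====
-- Stem walks of A's search crash on '!' ('!' is A's sentinel key): pvBadStem ws p holds iff
-- searching stem p (the chars before the first '?') in the trie of ws reaches the length list
-- stored under '!' and then reads it as a dict (TypeError in Python A).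
def pvBadStem (ws : List (List Char)) (p : List Char) : Bool :=
  (p.getLast? == some '!') && decide (2 ≤ p.length) &&
    ((!p.dropLast.contains '!') && ws.any (fun w => p.dropLast.isPrefixOf w)
      || (p == ['!', '!'] && ws.contains ['!']))

-- Pre_ excludes exactly the inputs on which Python A raises: an empty query (IndexError on
-- query[0]), a word of length ≥ 2 containing '!' (TypeError while building the trie or the
-- reversed-word trie), and a prefix/suffix query whose search walk hits '!' right before its
-- '?' (pvBadStem above, applied in the direction A searches). A returns normally on all
-- other inputs and B matches it there. (The Lean PORTS agree on every input — the proof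
-- below needs no hypothesis — Pre_ delimits where Python A itself returns a value.)
def Pre_solution (words : List String) (queries : List String) : Prop :=
  (∀ q ∈ queries, q.toList ≠ []) ∧
  (∀ w ∈ words, 2 ≤ w.toList.length → '!' ∉ w.toList) ∧
  (∀ q ∈ queries,
    (q.toList.head? ≠ some '?' ∧ q.toList.getLast? = some '?' →
      pvBadStem (words.map (fun w => w.toList)) (q.toList.takeWhile (fun c => c != '?')) = false) ∧
    (q.toList.head? = some '?' ∧ q.toList.getLast? ≠ some '?' →
      pvBadStem (words.map (fun w => w.toList.reverse))
        (q.toList.reverse.takeWhile (fun c => c != '?')) = false))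

instance (words : List String) (queries : List String) : Decidable (Pre_solution words queries) := by
  unfold Pre_solution; infer_instance

def pvWitness_solution : List String × List String := (["frodo", "front", "frost"], ["fro??", "?????", "??ost"])

def Spec_solution (words : List String) (queries : List String) (out : List Int) : Prop := out = solution_alt words queries
instance (words : List String) (queries : List String) (out : List Int) : Decidable (Spec_solution words queries out) := by unfold Spec_solution; infer_instance

-- ===== CLAIM (what is proved, stated in full; the proofs are below) =====
def Claim_equal_solution : Prop := ∀ (words : List String) (queries : List String), Dom_solution words queries → Pre_solution words queries → Spec_solution words queries (solution words queries)


-- ===== LEMMAS AND PROOFS =====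

-- -------- A side: the '!' lists of the trie are the lengths of the words through that node --------

theorem pv_bang_mk (b : List Int) (k : PvKids) : (PvTrie.mk b k).bang = b := rfl
theorem pv_kids_mk (b : List Int) (k : PvKids) : (PvTrie.mk b k).kids = k := rfl

theorem pv_find?_set : ∀ (k : PvKids) (c : Char) (t : PvTrie) (c' : Char),
    (k.set c t).find? c' = if c' = c then some t else k.find? c'
  | .nil, c, t, c' => by
    simp only [PvKids.set, PvKids.find?]
    by_cases h : c = c'
    · subst h; simp
    · rw [if_neg h, if_neg (fun hh : c' = c => h hh.symm)]
  | .cons c0 t0 k, c, t, c' => by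
    simp only [PvKids.set]
    by_cases h0 : c0 = c
    · subst h0
      rw [if_pos rfl]
      simp only [PvKids.find?]
      by_cases h : c' = c0
      · subst h; simp
      · rw [if_neg (fun hh : c0 = c' => h hh.symm), if_neg h,
          if_neg (fun hh : c0 = c' => h hh.symm)]
    · rw [if_neg h0]
      simp only [PvKids.find?]
      by_cases h : c0 = c'
      · have hne : ¬ c' = c := fun hh => h0 (h.trans hh)
        rw [if_pos h, if_neg hne, if_pos h]
      · rw [if_neg h, if_neg h, pv_find?_set k c t c']

theorem pv_insert_cons (b : List Int) (k : PvKids) (L : Int) (c : Char) (cs : List Char) :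
    pvInsert (.mk b k) L (c :: cs)
      = match k.find? c with
        | some t' => .mk b (k.set c (pvInsert (.mk (t'.bang ++ [L]) t'.kids) L cs))
        | none => .mk b (k.set c (pvInsert (.mk [L] .nil) L cs)) := rfl

theorem pv_bang_insert (t : PvTrie) (L : Int) (cs : List Char) :
    (pvInsert t L cs).bang = t.bang := by
  obtain ⟨b, k⟩ := t
  cases cs with
  | nil => rfl
  | cons c cs =>
    rw [pv_insert_cons]
    rcases h : k.find? c with _ | t' <;> simp only [pv_bang_mk]

-- follow a path in the trie and return its '!' list (none: path absent)
def pvPathBang : PvTrie → List Char → Option (List Int)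
  | t, [] => some t.bang
  | t, c :: cs =>
    match t.kids.find? c with
    | some t' => pvPathBang t' cs
    | none => none

theorem pv_pathBang_nil (t : PvTrie) : pvPathBang t [] = some t.bang := rfl

theorem pv_pathBang_cons_some (b : List Int) (k : PvKids) (c : Char) (ps : List Char)
    (t' : PvTrie) (h : k.find? c = some t') :
    pvPathBang (.mk b k) (c :: ps) = pvPathBang t' ps := by
  simp [pvPathBang, pv_kids_mk, h]

theorem pv_pathBang_cons_none (b : List Int) (k : PvKids) (c : Char) (ps : List Char)
    (h : k.find? c = none) :
    pvPathBang (.mk b k) (c :: ps) = none := by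
  simp [pvPathBang, pv_kids_mk, h]

theorem pv_pathBang_bang_irrel (b b' : List Int) (k : PvKids) (c : Char) (ps : List Char) :
    pvPathBang (.mk b k) (c :: ps) = pvPathBang (.mk b' k) (c :: ps) := by
  rcases h : k.find? c with _ | t'
  · rw [pv_pathBang_cons_none b k c ps h, pv_pathBang_cons_none b' k c ps h]
  · rw [pv_pathBang_cons_some b k c ps t' h, pv_pathBang_cons_some b' k c ps t' h]

theorem pv_pathBang_set_ne (b : List Int) (k : PvKids) (c' : Char) (ch : PvTrie)
    (c : Char) (ps : List Char) (hc : ¬ c = c') :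
    pvPathBang (.mk b (k.set c' ch)) (c :: ps) = pvPathBang (.mk b k) (c :: ps) := by
  have hf : (k.set c' ch).find? c = k.find? c := by rw [pv_find?_set, if_neg hc]
  rcases h : k.find? c with _ | u
  · rw [pv_pathBang_cons_none _ _ _ _ (hf.trans h), pv_pathBang_cons_none _ _ _ _ h]
  · rw [pv_pathBang_cons_some _ _ _ _ _ (hf.trans h), pv_pathBang_cons_some _ _ _ _ _ h]

theorem pv_find?_set_self (k : PvKids) (c : Char) (ch : PvTrie) :
    (k.set c ch).find? c = some ch := by
  rw [pv_find?_set, if_pos rfl]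

theorem pv_insert_pathBang (L : Int) : ∀ (ps : List Char) (c : Char) (cs : List Char) (t : PvTrie),
    (pvPathBang (pvInsert t L cs) (c :: ps)).getD []
      = (pvPathBang t (c :: ps)).getD [] ++ (if (c :: ps).isPrefixOf cs then [L] else []) := by
  intro ps
  induction ps with
  | nil =>
    intro c cs t
    obtain ⟨b, k⟩ := t
    cases cs with
    | nil => simp [pvInsert, List.isPrefixOf]
    | cons c' cs' =>
      rw [pv_insert_cons]
      rcases h : k.find? c' with _ | t'
      · simp only []
        by_cases hc : c = c'
        · subst hc
          rw [pv_pathBang_cons_some _ _ _ _ _ (pv_find?_set_self k c _),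
            pv_pathBang_nil, pv_bang_insert, pv_pathBang_cons_none _ _ _ _ h]
          simp [pv_bang_mk, List.isPrefixOf]
        · rw [pv_pathBang_set_ne _ _ _ _ _ _ hc]
          simp [List.isPrefixOf, hc]
      · obtain ⟨tb, tk⟩ := t'
        simp only []
        by_cases hc : c = c'
        · subst hc
          rw [pv_pathBang_cons_some _ _ _ _ _ (pv_find?_set_self k c _),
            pv_pathBang_nil, pv_bang_insert, pv_pathBang_cons_some _ _ _ _ _ h,
            pv_pathBang_nil]
          simp [pv_bang_mk, List.isPrefixOf]
        · rw [pv_pathBang_set_ne _ _ _ _ _ _ hc]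
          simp [List.isPrefixOf, hc]
  | cons d ps' ih =>
    intro c cs t
    obtain ⟨b, k⟩ := t
    cases cs with
    | nil => simp [pvInsert, List.isPrefixOf]
    | cons c' cs' =>
      rw [pv_insert_cons]
      rcases h : k.find? c' with _ | t'
      · simp only []
        by_cases hc : c = c'
        · subst hc
          rw [pv_pathBang_cons_some _ _ _ _ _ (pv_find?_set_self k c _),
            ih d cs' (.mk [L] .nil),
            pv_pathBang_cons_none ([L]) (.nil) d ps' rfl,
            pv_pathBang_cons_none _ _ _ _ h]
          simp [List.isPrefixOf]
        · rw [pv_pathBang_set_ne _ _ _ _ _ _ hc]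
          simp [List.isPrefixOf, hc]
      · obtain ⟨tb, tk⟩ := t'
        simp only [pv_bang_mk, pv_kids_mk]
        by_cases hc : c = c'
        · subst hc
          rw [pv_pathBang_cons_some _ _ _ _ _ (pv_find?_set_self k c _),
            ih d cs' (.mk (tb ++ [L]) tk),
            pv_pathBang_bang_irrel (tb ++ [L]) tb,
            pv_pathBang_cons_some _ _ _ _ _ h]
          simp [List.isPrefixOf]
        · rw [pv_pathBang_set_ne _ _ _ _ _ _ hc]
          simp [List.isPrefixOf, hc]

theorem pv_makeTrie_pathBang (c : Char) (ps : List Char) :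
    ∀ (ws : List String) (t : PvTrie),
    (pvPathBang (ws.foldl (fun t w => pvInsert t (PySem.Str.len w) w.toList) t) (c :: ps)).getD []
      = (pvPathBang t (c :: ps)).getD []
        ++ (ws.filter (fun w => (c :: ps).isPrefixOf w.toList)).map PySem.Str.len := by
  intro ws
  induction ws with
  | nil => intro t; simp
  | cons w ws ih =>
    intro t
    simp only [List.foldl_cons, List.filter_cons]
    rw [ih, pv_insert_pathBang]
    by_cases h : (c :: ps).isPrefixOf w.toList <;>
      simp [h]

theorem pv_search_eq (L : Int) : ∀ (p r : List Char) (t : PvTrie), '?' ∉ p →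
    pvSearch t (p ++ '?' :: r) L = (PySem.List.count ((pvPathBang t p).getD []) L : Int) := by
  intro p
  induction p with
  | nil => intro r t _; simp [pvSearch, pvPathBang]
  | cons c p' ih =>
    intro r t hp
    have hc : ¬ c = '?' := fun h => hp (by simp [h])
    simp only [List.cons_append, pvSearch, if_neg hc]
    obtain ⟨b, k⟩ := t
    rcases h : PvKids.find? k c with _ | t'
    · simp only [pv_kids_mk, h, pv_pathBang_cons_none b k c p' h]
      simp [PySem.List.count_eq]
    · simp only [pv_kids_mk, h, pv_pathBang_cons_some b k c p' t' h]
      exact ih r t' (fun hm => hp (List.mem_cons_of_mem _ hm))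

theorem pv_count_map_len (ws : List String) (P : String → Bool) (L : Int) :
    PySem.List.count ((ws.filter P).map PySem.Str.len) L
      = (ws.filter (fun w => P w && (PySem.Str.len w == L))).length := by
  induction ws with
  | nil => simp [PySem.List.count_eq]
  | cons w ws ih =>
    simp only [List.filter_cons]
    by_cases hP : P w <;> by_cases hL : PySem.Str.len w == L <;>
      simp [hP, PySem.List.count_eq, List.count_cons] <;>
      simp_all

-- -------- B side: the dict counters --------

theorem pv_getD_counter {ι κ : Type} [BEq κ] [LawfulBEq κ] [DecidableEq κ] (key : ι → κ) :
    ∀ (xs : List ι) (d : PySem.Dict κ Int) (k0 : κ),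
    (xs.foldl (fun d i => d.insert (key i) (d.getD (key i) 0 + 1)) d).getD k0 0
      = d.getD k0 0 + ((xs.filter (fun i => key i == k0)).length : Int) := by
  intro xs
  induction xs with
  | nil => intro d k0; simp
  | cons x xs ih =>
    intro d k0
    simp only [List.foldl_cons, List.filter_cons]
    rw [ih, PySem.Dict.getD_insert]
    by_cases h : k0 = key x
    · subst h
      rw [if_pos rfl]
      simp only [beq_self_eq_true, if_pos, List.length_cons]
      push_cast
      ring
    · have hb : (key x == k0) = false := by simp [Ne.symm h]
      rw [if_neg h, hb]
      simp

theorem pv_stemGo_eq : ∀ l : List Char, pvStemGo l = l.takeWhile (fun c => c != '?') := by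
  intro l
  induction l with
  | nil => rfl
  | cons c cs ih =>
    by_cases h : c = '?' <;> simp [pvStemGo, h, ih]

set_option maxRecDepth 4096 in
theorem pv_inner_count (w s : String) (L : Int) (hs : s.toList ≠ []) :
    (((PySem.List.pyRange 1 (PySem.Str.len w + 1) 1).filter
        (fun i => ((PySem.Str.slice w none (some i), PySem.Str.len w) : String × Int) == (s, L))).length : Int)
      = if s.toList.isPrefixOf w.toList ∧ PySem.Str.len w = L then 1 else 0 := by
  have hslen : 0 < s.toList.length := List.length_pos_iff.mpr hs
  have h1 : (PySem.Str.len w + 1 - 1).toNat = w.toList.length := by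
    rw [PySem.Str.len_eq]; omega
  rw [PySem.List.pyRange_one, h1, ← List.countP_eq_length_filter, List.countP_map]
  have hsl : ∀ k : ℕ, (PySem.Str.slice w none (some ((1 : ℤ) + ↑k))).toList
      = w.toList.take (k + 1) := by
    intro k
    rw [PySem.Str.toList_slice]
    show PySem.List.slice w.toList none (some ((1 : ℤ) + ↑k)) = _
    rw [PySem.List.slice_to (α := Char) w.toList (b := (1 : ℤ) + ↑k) (by omega)]
    congr 1
    omega
  by_cases hC : s.toList.isPrefixOf w.toList ∧ PySem.Str.len w = L
  · rw [if_pos hC]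
    obtain ⟨hpre', hlenL⟩ := hC
    have hpre : s.toList <+: w.toList := List.isPrefixOf_iff_prefix.mp hpre'
    have hle : s.toList.length ≤ w.toList.length := hpre.length_le
    have htake : s.toList = w.toList.take s.toList.length := List.prefix_iff_eq_take.mp hpre
    have hpoint : ∀ k ∈ List.range w.toList.length,
        ((fun i => ((PySem.Str.slice w none (some i), PySem.Str.len w) : String × Int) == (s, L)) ∘
          (fun k : ℕ => (1 : ℤ) + ↑k)) k = true
        ↔ (decide (k = s.toList.length - 1)) = true := by
      intro k hk
      rw [List.mem_range] at hk
      simp only [Function.comp_apply, beq_iff_eq, Prod.mk.injEq, decide_eq_true_eq]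
      constructor
      · rintro ⟨hfst, -⟩
        have htl : w.toList.take (k + 1) = s.toList := by
          rw [← hsl k, hfst]
        have hlen2 : (w.toList.take (k + 1)).length = s.toList.length := by rw [htl]
        rw [List.length_take_of_le (by omega)] at hlen2
        omega
      · intro hkk
        have hk1 : k + 1 = s.toList.length := by omega
        refine ⟨?_, hlenL⟩
        apply String.toList_inj.mp
        rw [hsl k, hk1, ← htake]
    rw [List.countP_congr hpoint]
    have hcnt : List.countP (fun k => decide (k = s.toList.length - 1)) (List.range w.toList.length)
        = List.count (s.toList.length - 1) (List.range w.toList.length) := by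
      apply List.countP_congr
      intro k _
      simp
    rw [hcnt, List.count_range, if_pos (by omega)]
    simp
  · rw [if_neg hC]
    have hzero : List.countP
        ((fun i => ((PySem.Str.slice w none (some i), PySem.Str.len w) : String × Int) == (s, L)) ∘
          (fun k : ℕ => (1 : ℤ) + ↑k))
        (List.range w.toList.length) = 0 := by
      apply List.countP_eq_zero.mpr
      intro k hk
      rw [List.mem_range] at hk
      simp only [Function.comp_apply, beq_iff_eq, Prod.mk.injEq, not_and]
      intro hfst hsnd
      apply hC
      have htl : w.toList.take (k + 1) = s.toList := by
        rw [← hsl k, hfst]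
      have hlen2 : (w.toList.take (k + 1)).length = s.toList.length := by rw [htl]
      rw [List.length_take_of_le (by omega)] at hlen2
      constructor
      · apply List.isPrefixOf_iff_prefix.mpr
        rw [List.prefix_iff_eq_take, ← hlen2]
        exact htl.symm
      · exact hsnd
    rw [hzero]
    simp

theorem pv_getD_index (s : String) (L : Int) (hs : s.toList ≠ []) :
    ∀ (ws : List String) (d : PySem.Dict (String × Int) Int),
    (ws.foldl pvIndexStep d).getD (s, L) 0
      = d.getD (s, L) 0
        + ((ws.filter (fun w => s.toList.isPrefixOf w.toList && (PySem.Str.len w == L))).length : Int) := by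
  intro ws
  induction ws with
  | nil => intro d; simp
  | cons w ws ih =>
    intro d
    simp only [List.foldl_cons, List.filter_cons]
    rw [ih]
    have hrw : pvIndexStep d w
        = (PySem.List.pyRange 1 (PySem.Str.len w + 1) 1).foldl
            (fun d i => d.insert ((PySem.Str.slice w none (some i), PySem.Str.len w) : String × Int)
              (d.getD ((PySem.Str.slice w none (some i), PySem.Str.len w) : String × Int) 0 + 1)) d := rfl
    rw [hrw, pv_getD_counter (fun i => ((PySem.Str.slice w none (some i), PySem.Str.len w) : String × Int)),
      pv_inner_count w s L hs]
    by_cases h : s.toList.isPrefixOf w.toList ∧ PySem.Str.len w = L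
    · have hb : (s.toList.isPrefixOf w.toList && (PySem.Str.len w == L)) = true := by
        rw [h.1, h.2]
        simp
      rw [if_pos h]
      simp only [hb, if_true]
      push_cast [List.length_cons]
      ring
    · have hb : (s.toList.isPrefixOf w.toList && (PySem.Str.len w == L)) = false := by
        rcases Decidable.not_and_iff_not_or_not.mp h with h' | h'
        · have h1 : s.toList.isPrefixOf w.toList = false := Bool.eq_false_iff.mpr h'
          rw [h1, Bool.false_and]
        · have h2 : (PySem.Str.len w == L) = false := beq_eq_false_iff_ne.mpr h'
          rw [h2, Bool.and_false]
      rw [if_neg h]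
      simp only [hb, Bool.false_eq_true, if_false]
      ring

-- -------- the per-branch bridge --------

theorem pv_branchA (ws : List String) (c : Char) (ps r : List Char) (L : Int)
    (hp : '?' ∉ c :: ps) :
    pvSearch (pvMakeTrie (.mk [] .nil) ws) ((c :: ps) ++ '?' :: r) L
      = ((ws.filter (fun w => (c :: ps).isPrefixOf w.toList && (PySem.Str.len w == L))).length : Int) := by
  rw [pv_search_eq L (c :: ps) r _ hp]
  unfold pvMakeTrie
  rw [pv_makeTrie_pathBang]
  have hroot : (pvPathBang (.mk [] .nil) (c :: ps)).getD ([] : List Int) = [] := by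
    rw [pv_pathBang_cons_none [] (.nil) c ps rfl]
    rfl
  rw [hroot, List.nil_append]
  have := pv_count_map_len ws (fun w => (c :: ps).isPrefixOf w.toList) L
  exact_mod_cast this

theorem pv_branch (ws : List String) (q' : String) (L : Int)
    (hne : q'.toList ≠ []) (hhead : q'.toList.head hne ≠ '?') (hmem : '?' ∈ q'.toList) :
    pvSearch (pvMakeTrie (.mk [] .nil) ws) q'.toList L = (pvIndex ws).getD (pvStem q', L) 0 := by
  have hstem : (pvStem q').toList = q'.toList.takeWhile (fun c => c != '?') := by
    simp [pvStem, String.toList_ofList, pv_stemGo_eq]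
  have hdw : q'.toList.dropWhile (fun c => c != '?') ≠ [] := by
    intro h
    rw [List.dropWhile_eq_nil_iff] at h
    have := h '?' hmem
    simp at this
  obtain ⟨x, xs, hx⟩ := List.exists_cons_of_ne_nil hdw
  have hx' : q'.toList.dropWhile (fun c => c != '?') = '?' :: xs := by
    have hhd := List.head_dropWhile_not (fun c => c != '?') hdw
    have h2 : (q'.toList.dropWhile (fun c => c != '?')).head? = some x := by rw [hx]; rfl
    have h3 := List.head?_eq_some_head hdw
    rw [h2] at h3
    have hxh : x = (q'.toList.dropWhile (fun c => c != '?')).head hdw := by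
      exact Option.some.inj h3
    rw [← hxh] at hhd
    have : x = '?' := by simpa using hhd
    rw [hx, this]
  have hdec : q'.toList
      = q'.toList.takeWhile (fun c => c != '?') ++ '?' :: xs := by
    conv_lhs => rw [← List.takeWhile_append_dropWhile (p := fun c => c != '?') (l := q'.toList)]
    rw [hx']
  obtain ⟨c, rest, hq⟩ : ∃ c rest, q'.toList = c :: rest := by
    cases hql : q'.toList with
    | nil => exact absurd hql hne
    | cons a l => exact ⟨a, l, rfl⟩
  have hc : c ≠ '?' := by
    have : q'.toList.head hne = c := by simp [hq]
    rw [← this]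
    exact hhead
  have htw : q'.toList.takeWhile (fun c => c != '?')
      = c :: rest.takeWhile (fun c => c != '?') := by
    rw [hq, List.takeWhile_cons, if_pos (by simp [hc])]
  have hnomem : '?' ∉ c :: rest.takeWhile (fun c => c != '?') := by
    rw [← htw]
    intro hm
    have := List.mem_takeWhile_imp hm
    simp at this
  conv_lhs => rw [hdec, htw]
  rw [pv_branchA ws c (rest.takeWhile (fun c => c != '?')) xs L hnomem]
  unfold pvIndex
  rw [pv_getD_index (pvStem q') L (by rw [hstem, htw]; simp)]
  rw [PySem.Dict.getD_empty, zero_add, hstem, htw]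

-- -------- assembling the two solutions --------

theorem pv_foldl_ext {α β : Type} (f g : α → β → α) (h : ∀ a b, f a b = g a b)
    (a : α) (l : List β) : l.foldl f a = l.foldl g a := by
  have : f = g := funext fun a => funext (h a)
  rw [this]

theorem pv_pyGet?_zero_toList (q : String) : PySem.Str.pyGet? q 0 = q.toList[0]? := by
  rw [PySem.Str.pyGet?]
  exact PySem.List.pyGet?_zero q.toList

theorem pv_pyGet?_neg_one_toList (q : String) : PySem.Str.pyGet? q (-1) = q.toList.getLast? := by
  rw [PySem.Str.pyGet?]
  exact PySem.List.pyGet?_neg_one q.toList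

theorem pv_count_len (ws : List String) (L : Int) :
    PySem.List.count (ws.map (fun w => PySem.Str.len w)) L
      = (ws.filter (fun w => PySem.Str.len w == L)).length := by
  induction ws with
  | nil => simp [PySem.List.count_eq]
  | cons w ws ih =>
    simp only [List.map_cons, List.filter_cons, PySem.List.count_eq] at ih ⊢
    rw [List.count_cons, ih]
    by_cases hL : (PySem.Str.len w == L) = true
    · rw [hL]
      simp
    · rw [Bool.eq_false_iff.mpr hL]
      simp

theorem pv_byLen_eq (words : List String) (L : Int) :
    (PySem.List.count (words.map (fun w => PySem.Str.len w)) L : Int)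
      = (words.foldl (fun d w => d.insert (PySem.Str.len w) (d.getD (PySem.Str.len w) 0 + 1))
          PySem.Dict.empty).getD L 0 := by
  have h1 := pv_getD_counter (fun w : String => PySem.Str.len w) words PySem.Dict.empty L
  simp only [PySem.Dict.getD_empty, zero_add] at h1
  rw [h1]
  exact_mod_cast pv_count_len words L

theorem pv_branch_str (ws : List String) (q' : String) (L : Int) (c0 : Char)
    (hq0 : q'.toList.head? = some c0) (hc0 : c0 ≠ '?') (hmem : '?' ∈ q'.toList) :
    pvSearch (pvMakeTrie (.mk [] .nil) ws) q'.toList L = (pvIndex ws).getD (pvStem q', L) 0 := by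
  have hne : q'.toList ≠ [] := by
    intro h
    rw [h] at hq0
    simp at hq0
  have hh : q'.toList.head hne = c0 := by
    rw [List.head?_eq_some_head hne] at hq0
    exact Option.some.inj hq0
  exact pv_branch ws q' L hne (by rw [hh]; exact hc0) hmem

theorem pv_query_eq (words : List String) (ans : List Int) (q : String) :
    (match PySem.Str.pyGet? q 0, PySem.Str.pyGet? q (-1) with
      | some c0, some cl =>
        if c0 = '?' ∧ cl = '?' then
          ans ++ [(PySem.List.count (words.map (fun w => PySem.Str.len w)) (PySem.Str.len q) : Int)]
        else if c0 = '?' then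
          ans ++ [pvSearch (pvMakeTrie (.mk [] .nil) (words.map (fun w => (PySem.Str.slice? w none none (-1)).getD "")))
            (((PySem.Str.slice? q none none (-1)).getD "").toList) (PySem.Str.len q)]
        else if cl = '?' then
          ans ++ [pvSearch (pvMakeTrie (.mk [] .nil) words) q.toList (PySem.Str.len q)]
        else ans
      | _, _ => ans)
    = (match PySem.Str.pyGet? q 0 with
      | none => ans
      | some c0 =>
        match PySem.Str.pyGet? q (-1) with
        | none => ans
        | some cl =>
          if c0 = '?' ∧ cl = '?' then
            ans ++ [(words.foldl (fun d w => d.insert (PySem.Str.len w) (d.getD (PySem.Str.len w) 0 + 1))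
              PySem.Dict.empty).getD (PySem.Str.len q) 0]
          else if c0 = '?' then
            ans ++ [(pvIndex (words.map (fun w => (PySem.Str.slice? w none none (-1)).getD ""))).getD
              (pvStem ((PySem.Str.slice? q none none (-1)).getD ""), PySem.Str.len q) 0]
          else if cl = '?' then
            ans ++ [(pvIndex words).getD (pvStem q, PySem.Str.len q) 0]
          else ans) := by
  rcases h0 : PySem.Str.pyGet? q 0 with _ | c0 <;>
    rcases h1 : PySem.Str.pyGet? q (-1) with _ | cl <;>
      simp only [h0, h1]
  by_cases hb1 : c0 = '?' ∧ cl = '?'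
  · rw [if_pos hb1, if_pos hb1, pv_byLen_eq]
  · rw [if_neg hb1, if_neg hb1]
    by_cases hb2 : c0 = '?'
    · rw [if_pos hb2, if_pos hb2]
      have hq : ((PySem.Str.slice? q none none (-1)).getD "") = String.ofList q.toList.reverse := by
        rw [PySem.Str.slice?_none_none_neg_one]
        rfl
      rw [hq]
      refine congrArg (fun z => ans ++ [z]) ?_
      apply pv_branch_str
      · rw [String.toList_ofList, List.head?_reverse]
        rw [pv_pyGet?_neg_one_toList] at h1
        exact h1
      · exact fun hcl => hb1 ⟨hb2, hcl⟩
      · rw [String.toList_ofList, List.mem_reverse]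
        rw [pv_pyGet?_zero_toList] at h0
        rw [← hb2]
        exact List.mem_of_getElem? h0
    · rw [if_neg hb2, if_neg hb2]
      by_cases hb3 : cl = '?'
      · rw [if_pos hb3, if_pos hb3]
        refine congrArg (fun z => ans ++ [z]) ?_
        apply pv_branch_str words q (PySem.Str.len q) c0
        · rw [List.head?_eq_getElem?]
          rw [pv_pyGet?_zero_toList] at h0
          exact h0
        · exact hb2
        · rw [pv_pyGet?_neg_one_toList] at h1
          rw [← hb3]
          exact List.mem_of_getLast? h1
      · rw [if_neg hb3, if_neg hb3]

theorem pv_main (words queries : List String) : solution words queries = solution_alt words queries := by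
  unfold solution solution_alt
  exact pv_foldl_ext _ _ (fun ans q => pv_query_eq words ans q) [] queries

-- ===== VERDICT (by name: the statement is the Claim_ definition above) =====
theorem solution_spec : Claim_equal_solution := by
  intro words queries _ _
  unfold Spec_solution
  exact pv_main words queries
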